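-- pv_equiv track=rewrite | github.com/HeartBioPortal/DataHub | scripts/dataset_specific_scripts/unified/publish_unified_from_duckdb.py | _source_priority_rows
-- ===== SOURCE A (Python) =====
-- def _source_priority_rows(source_priority: str) -> list[tuple[str, int]]:
--     rows: list[tuple[str, int]] = []
--     rank = 1
--     for source in source_priority.split(","):
--         normalized = source.strip().lower()
--         if not normalized:
--             continue
--         rows.append((normalized, rank))
--         rank += 1
--     return rows
-- ===== SOURCE B (Python) =====
-- def _source_priority_rows(source_priority: str) -> list[tuple[str, int]]:
--     """Character-level streaming tokenizer: no split(), no strip(), no rank counter."""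
--     cur: list[str] = []
--     rows: list[tuple[str, int]] = []
--     for ch in source_priority:
--         if ch == ",":
--             rows = _flush(cur, rows)
--             cur = []
--         else:
--             cur.append(ch.lower())
--     return _flush(cur, rows)
--
--
-- def _flush(cur, rows):
--     word = _trim_right(_trim_left(cur))
--     if word:
--         return rows + [("".join(word), len(rows) + 1)]
--     return rows
--
--
-- def _trim_left(chars):
--     while chars and chars[0].isspace():
--         chars = chars[1:]
--     return chars
--
--
-- def _trim_right(chars):
--     while chars and chars[-1].isspace():
--         chars = chars[:-1]
--     return chars
-- ===== Notes on version B (the rewrite author's own statement) =====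
-- stated objective: alternative
-- what changed: Replaced A's split()/strip()/rank-counter loop by a character-level streaming tokenizer that builds and flushes tokens itself, trims whitespace with its own two trimming loops, and derives each rank from the length of the output built so far instead of a counter.
import Mathlib
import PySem

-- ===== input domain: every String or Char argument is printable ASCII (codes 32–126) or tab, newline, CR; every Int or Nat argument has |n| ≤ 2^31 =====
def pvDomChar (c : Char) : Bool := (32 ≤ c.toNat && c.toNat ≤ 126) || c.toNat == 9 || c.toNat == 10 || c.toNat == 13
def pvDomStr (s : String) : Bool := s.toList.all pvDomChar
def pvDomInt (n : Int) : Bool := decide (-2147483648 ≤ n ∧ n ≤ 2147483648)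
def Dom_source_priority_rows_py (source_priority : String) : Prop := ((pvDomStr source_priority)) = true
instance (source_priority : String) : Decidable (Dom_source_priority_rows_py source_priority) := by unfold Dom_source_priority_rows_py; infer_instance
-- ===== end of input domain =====

-- B replaces A's split/strip/counter loop by a character-level streaming tokenizer whose ranks come from the output length; objective: alternative (not faster).

-- ===== PORT A =====
def source_priority_rows_py (source_priority : String) : List (String × Int) :=
  let step := fun (st : List (String × Int) × Int) (source : String) =>
    let normalized := PySem.Str.lower (PySem.Str.strip source)
    if normalized = "" then st
    else (st.1 ++ [(normalized, st.2)], st.2 + 1)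
  (((PySem.Str.split? source_priority ",").getD []).foldl step ([], 1)).1

-- ===== PORT B =====
-- _trim_left: drop leading whitespace chars one by one
def pvTrimLeft : List Char → List Char
  | [] => []
  | c :: cs => if PySem.Chars.isspace c then pvTrimLeft cs else c :: cs

-- _trim_right: drop trailing whitespace chars one by one (chars[-1] / chars[:-1])
def pvTrimRight (cs : List Char) : List Char :=
  if h : cs ≠ [] ∧ PySem.Chars.isspace (PySem.List.pyGetD cs (-1) ' ') = true then
    pvTrimRight cs.dropLast
  else cs
termination_by cs.length
decreasing_by
  have hp : 0 < cs.length := List.length_pos_iff.mpr h.1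
  simp [List.length_dropLast]
  omega

-- _flush: trim the current token; if non-empty append it ranked len(rows)+1
def pvFlush (cur : List Char) (rows : List (String × Int)) : List (String × Int) :=
  let word := pvTrimRight (pvTrimLeft cur)
  if word = [] then rows
  else rows ++ [(String.ofList word, PySem.List.len rows + 1)]

-- the main for-loop over the characters, state = (cur, rows); final flush after the loop
def source_priority_rows_py_alt (source_priority : String) : List (String × Int) :=
  let st := source_priority.toList.foldl
    (fun (st : List Char × List (String × Int)) ch =>
      if ch = ',' then ([], pvFlush st.1 st.2)
      else (st.1 ++ [PySem.Chars.lowerChar ch], st.2)) ([], [])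
  pvFlush st.1 st.2

-- ===== PRECONDITION & SPEC =====
def Spec_source_priority_rows_py (source_priority : String) (out : List (String × Int)) : Prop := out = source_priority_rows_py_alt source_priority
instance (source_priority : String) (out : List (String × Int)) : Decidable (Spec_source_priority_rows_py source_priority out) := by unfold Spec_source_priority_rows_py; infer_instance

-- ===== CLAIM (what is proved, stated in full; the proofs are below) =====
def Claim_equal_source_priority_rows_py : Prop := ∀ (source_priority : String), Dom_source_priority_rows_py source_priority → Spec_source_priority_rows_py source_priority (source_priority_rows_py source_priority)

-- ===== LEMMAS AND PROOFS =====

-- simple recursive characterisation of splitting on a single comma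
def pvSplitC : List Char → List (List Char)
  | [] => [[]]
  | c :: cs => if c = ',' then [] :: pvSplitC cs else (pvSplitC cs).modifyHead (c :: ·)

-- char-level version of A's loop body, rank read off the accumulator length
def pvG (rows : List (String × Int)) (tok : List Char) : List (String × Int) :=
  if PySem.Chars.strip tok = [] then rows
  else rows ++ [(String.ofList (PySem.Chars.lower (PySem.Chars.strip tok)), (rows.length : Int) + 1)]

-- A's loop body re-expressed on the character level (same state, same branches)
def pvStep (st : List (String × Int) × Int) (source : String) : List (String × Int) × Int :=
  if PySem.Chars.strip source.toList = [] then st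
  else (st.1 ++ [(String.ofList (PySem.Chars.lower (PySem.Chars.strip source.toList)), st.2)], st.2 + 1)

theorem pv_step_eq :
    (fun (st : List (String × Int) × Int) (source : String) =>
      let normalized := PySem.Str.lower (PySem.Str.strip source)
      if normalized = "" then st
      else (st.1 ++ [(normalized, st.2)], st.2 + 1)) = pvStep := by
  funext st t
  unfold pvStep
  have htl : (PySem.Str.lower (PySem.Str.strip t)).toList
      = PySem.Chars.lower (PySem.Chars.strip t.toList) := by simp
  by_cases hz : PySem.Chars.strip t.toList = []
  · have he : PySem.Str.lower (PySem.Str.strip t) = "" := by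
      apply String.toList_inj.mp
      simp [htl, PySem.Chars.lower, hz]
    simp only [he, hz, if_pos rfl]
    simp
  · have hne : ¬ PySem.Str.lower (PySem.Str.strip t) = "" := by
      intro he
      apply hz
      have h2 := congrArg String.toList he
      rw [htl] at h2
      simpa [PySem.Chars.lower] using h2
    have hv : PySem.Str.lower (PySem.Str.strip t)
        = String.ofList (PySem.Chars.lower (PySem.Chars.strip t.toList)) := by
      apply String.toList_inj.mp
      simp [htl]
    simp only [if_neg hne, if_neg hz]
    rw [hv]

theorem pv_go_eq (fuel : Nat) (l cur : List Char) (acc : List (List Char))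
    (h : l.length ≤ fuel) :
    PySem.Chars.splitOn.go [','] fuel l cur acc
      = acc.reverse ++ (pvSplitC l).modifyHead (cur.reverse ++ ·) := by
  induction fuel generalizing l cur acc with
  | zero =>
    have : l = [] := by simpa using h
    subst this
    simp [PySem.Chars.splitOn.go, pvSplitC]
  | succ f ih =>
    cases l with
    | nil => simp [PySem.Chars.splitOn.go, pvSplitC]
    | cons c rest =>
      by_cases hc : c = ','
      · subst hc
        rw [PySem.Chars.splitOn.go]
        rw [if_pos (by simp [List.isPrefixOf])]
        rw [ih _ _ _ (by simpa using h)]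
        simp [pvSplitC]
        cases pvSplitC rest <;> simp
      · rw [PySem.Chars.splitOn.go]
        rw [if_neg (by simp [List.isPrefixOf]; exact fun h => hc h.symm)]
        rw [ih _ _ _ (by simpa using h)]
        simp [pvSplitC, hc, List.modifyHead_modifyHead]
        congr 1

theorem pv_splitOn_eq (l : List Char) : PySem.Chars.splitOn l [','] = pvSplitC l := by
  rw [PySem.Chars.splitOn, pv_go_eq _ _ _ _ (by omega)]
  cases h : pvSplitC l <;> simp

theorem pv_isspace_lowerChar (c : Char) :
    PySem.Chars.isspace (PySem.Chars.lowerChar c) = PySem.Chars.isspace c := by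
  unfold PySem.Chars.lowerChar
  by_cases h : PySem.Chars.isupper c = true
  · rw [if_pos h]
    simp [PySem.Chars.isupper, Char.le_def] at h
    have hn : 65 ≤ c.toNat ∧ c.toNat ≤ 90 := Prod.mk_le_mk.mp h
    have hv : (Char.ofNat (c.toNat + 32)).toNat = c.toNat + 32 := by
      rw [Char.toNat_ofNat, if_pos]
      simp only [Nat.isValidChar]
      omega
    have e1 : PySem.Chars.isspace c = false := by
      unfold PySem.Chars.isspace
      simp only [Bool.or_eq_false_iff, Bool.and_eq_false_iff, decide_eq_false_iff_not, not_le]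
      omega
    have e2 : PySem.Chars.isspace (Char.ofNat (c.toNat + 32)) = false := by
      unfold PySem.Chars.isspace
      simp only [hv, Bool.or_eq_false_iff, Bool.and_eq_false_iff, decide_eq_false_iff_not, not_le]
      omega
    rw [e1, e2]
  · rw [if_neg h]

theorem pv_trimLeft_eq (l : List Char) : pvTrimLeft l = List.dropWhile PySem.Chars.isspace l := by
  induction l with
  | nil => rfl
  | cons c cs ih =>
    rw [pvTrimLeft, List.dropWhile_cons]
    split_ifs with h <;> simp [ih]

theorem pv_trimRight_append (l : List Char) (c : Char) :
    pvTrimRight (l ++ [c]) = if PySem.Chars.isspace c then pvTrimRight l else l ++ [c] := by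
  by_cases hc : PySem.Chars.isspace c = true
  · rw [pvTrimRight, dif_pos ⟨by simp, by rw [PySem.List.pyGetD_neg_one_append_singleton]; exact hc⟩,
      List.dropLast_concat, if_pos hc]
  · rw [pvTrimRight, dif_neg (by simp [PySem.List.pyGetD_neg_one_append_singleton, hc]), if_neg hc]

theorem pv_trimRight_eq (l : List Char) : pvTrimRight l = PySem.Chars.rstrip l := by
  induction l using List.reverseRecOn with
  | nil => rw [pvTrimRight]; simp [PySem.Chars.rstrip]
  | append_singleton l c ih =>
    rw [pv_trimRight_append, PySem.Chars.rstrip, List.reverse_append]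
    simp only [List.reverse_cons, List.reverse_nil, List.nil_append, List.singleton_append,
      List.dropWhile_cons]
    split_ifs with h
    · rw [ih, PySem.Chars.rstrip]
    · simp

theorem pv_trim_lower (p : List Char) :
    pvTrimRight (pvTrimLeft (PySem.Chars.lower p))
      = PySem.Chars.lower (PySem.Chars.strip p) := by
  have hfun : (PySem.Chars.isspace ∘ PySem.Chars.lowerChar) = PySem.Chars.isspace := by
    funext c; exact pv_isspace_lowerChar c
  rw [pv_trimLeft_eq, pv_trimRight_eq, PySem.Chars.strip, PySem.Chars.lower,
    List.dropWhile_map, hfun, PySem.Chars.rstrip, PySem.Chars.rstrip,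
    ← List.map_reverse, List.dropWhile_map, hfun, ← List.map_reverse]
  rfl

theorem pv_flush_eq (p : List Char) (rows : List (String × Int)) :
    pvFlush (PySem.Chars.lower p) rows = pvG rows p := by
  unfold pvFlush
  simp only [pv_trim_lower]
  by_cases hz : PySem.Chars.strip p = []
  · simp [pvG, hz, PySem.Chars.lower]
  · have hne : PySem.Chars.lower (PySem.Chars.strip p) ≠ [] := by
      simp [PySem.Chars.lower, hz]
    simp [pvG, hz, hne, PySem.List.len_eq]

theorem pv_scan_eq (cs : List Char) (p : List Char) (rows : List (String × Int)) :
    pvFlush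
      (cs.foldl (fun (st : List Char × List (String × Int)) ch =>
          if ch = ',' then ([], pvFlush st.1 st.2)
          else (st.1 ++ [PySem.Chars.lowerChar ch], st.2)) (PySem.Chars.lower p, rows)).1
      (cs.foldl (fun (st : List Char × List (String × Int)) ch =>
          if ch = ',' then ([], pvFlush st.1 st.2)
          else (st.1 ++ [PySem.Chars.lowerChar ch], st.2)) (PySem.Chars.lower p, rows)).2
      = ((pvSplitC cs).modifyHead (p ++ ·)).foldl pvG rows := by
  induction cs generalizing p rows with
  | nil =>
    rw [List.foldl_nil, pvSplitC]
    simp only [List.modifyHead_cons, List.append_nil, List.foldl_cons, List.foldl_nil]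
    exact pv_flush_eq p rows
  | cons c rest ih =>
    by_cases hc : c = ','
    · subst hc
      have hstep : (if (',' : Char) = ','
            then (([] : List Char), pvFlush (PySem.Chars.lower p, rows).1 (PySem.Chars.lower p, rows).2)
            else ((PySem.Chars.lower p, rows).1 ++ [PySem.Chars.lowerChar ','], (PySem.Chars.lower p, rows).2))
          = ([], pvG rows p) := by
        simp [pv_flush_eq]
      rw [List.foldl_cons, hstep]
      have h2 := ih [] (pvG rows p)
      simp only [PySem.Chars.lower, List.map_nil] at h2
      rw [h2, pvSplitC]
      simp only [if_pos rfl, List.modifyHead_cons, List.foldl_cons, List.append_nil]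
      cases pvSplitC rest <;> simp
    · have hstep : (if c = ','
            then (([] : List Char), pvFlush (PySem.Chars.lower p, rows).1 (PySem.Chars.lower p, rows).2)
            else ((PySem.Chars.lower p, rows).1 ++ [PySem.Chars.lowerChar c], (PySem.Chars.lower p, rows).2))
          = (PySem.Chars.lower (p ++ [c]), rows) := by
        simp [hc, PySem.Chars.lower]
      rw [List.foldl_cons, hstep, ih (p ++ [c]) rows, pvSplitC]
      simp only [if_neg hc, List.modifyHead_modifyHead]
      congr 2
      funext x
      simp

theorem pv_alt_eq (sp : String) :
    source_priority_rows_py_alt sp = (pvSplitC sp.toList).foldl pvG [] := by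
  unfold source_priority_rows_py_alt
  have h := pv_scan_eq sp.toList [] []
  simp only [PySem.Chars.lower, List.map_nil] at h
  have hm : (pvSplitC sp.toList).modifyHead (([] : List Char) ++ ·) = pvSplitC sp.toList := by
    cases pvSplitC sp.toList <;> simp
  rw [hm] at h
  exact h

theorem pv_afold_eq (l : List String) (acc : List (String × Int)) (rank : Int)
    (h : rank = (acc.length : Int) + 1) :
    (l.foldl pvStep (acc, rank)).1 = (l.map String.toList).foldl pvG acc := by
  induction l generalizing acc rank with
  | nil => rfl
  | cons t l ih =>
    rw [List.foldl_cons, List.map_cons, List.foldl_cons]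
    by_cases hz : PySem.Chars.strip t.toList = []
    · rw [show pvStep (acc, rank) t = (acc, rank) by simp [pvStep, hz]]
      rw [show pvG acc t.toList = acc by simp [pvG, hz]]
      exact ih acc rank h
    · rw [show pvStep (acc, rank) t
          = (acc ++ [(String.ofList (PySem.Chars.lower (PySem.Chars.strip t.toList)), rank)],
              rank + 1) by simp [pvStep, hz]]
      rw [show pvG acc t.toList
          = acc ++ [(String.ofList (PySem.Chars.lower (PySem.Chars.strip t.toList)),
              (acc.length : Int) + 1)] by simp [pvG, hz]]
      rw [h]
      refine ih _ _ ?_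
      simp

-- ===== VERDICT (by name: the statement is the Claim_ definition above) =====
theorem source_priority_rows_py_spec : Claim_equal_source_priority_rows_py := by
  intro sp _
  unfold Spec_source_priority_rows_py source_priority_rows_py
  rw [pv_step_eq, pv_alt_eq]
  have hsplit : (PySem.Str.split? sp ",").getD []
      = (pvSplitC sp.toList).map String.ofList := by
    rw [PySem.Str.split?, PySem.Chars.split?]
    simp [pv_splitOn_eq]
  rw [hsplit, pv_afold_eq _ _ _ (by simp)]
  simp [Function.comp_def]
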